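-- pv_equiv track=rewrite | github.com/Inkognita/CourseWork | facebook_miner_class.py | link_editor
-- ===== SOURCE A (Python) =====
-- def link_editor(link):
--     """
--     Returns the only id from the url line
--     """
--     res_id = ""
--     link = link.strip()
--     if "profile.php" in link:
--         id_index = link.find("id=") + 3
--         for index in range(id_index, len(link)):
--             if link[index] in "0123456789":
--                 res_id += link[index]
--             else:
--                 return res_id
--     else:
--         id_index = link.find("facebook.com/") + 13
--         for index in range(id_index, len(link)):
--             if link[index] in "/?&":
--                 return res_id
--             else:
--                 res_id += link[index]
--     return res_id
-- ===== SOURCE B (Python) =====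
-- def link_editor(link):
--     """
--     Returns the only id from the url line
--     """
--     link = link.strip()
--     if "profile.php" in link:
--         tail = link[link.find("id=") + 3:]
--         return tail[:len(tail) - len(tail.lstrip("0123456789"))]
--     tail = link[link.find("facebook.com/") + 13:]
--     cut = min([i for i in (tail.find(c) for c in "/?&") if i != -1], default=len(tail))
--     return tail[:cut]
-- ===== Notes on version B (the rewrite author's own statement) =====
-- stated objective: idiomatic
-- what changed: A's two per-character accumulate/break loops are replaced by slice arithmetic on the tail: the digit prefix is cut via lstrip-length subtraction and the /?&-bounded prefix via min of the three finds; the scanning moves from a Python-level char loop into C-level str primitives.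
import Mathlib
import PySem

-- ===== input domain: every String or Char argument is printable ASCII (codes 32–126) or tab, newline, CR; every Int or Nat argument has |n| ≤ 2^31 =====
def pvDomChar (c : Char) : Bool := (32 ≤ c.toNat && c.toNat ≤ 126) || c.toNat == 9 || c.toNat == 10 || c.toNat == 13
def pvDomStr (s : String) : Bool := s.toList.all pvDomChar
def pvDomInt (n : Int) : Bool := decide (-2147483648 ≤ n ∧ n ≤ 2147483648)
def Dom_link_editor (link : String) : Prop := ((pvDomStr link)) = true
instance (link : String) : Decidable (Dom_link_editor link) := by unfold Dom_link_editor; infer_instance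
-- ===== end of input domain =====

-- B replaces A's per-character accumulation loops with slice arithmetic: the digit prefix via
-- lstrip-length subtraction, the sentinel-bounded prefix via min of the finds of '/','?','&'
-- (objective: idiomatic; a timing run measured B faster by a constant factor).

-- ===== PORT A =====
-- the profile.php loop: for index in range(i, len(s)): digit → accumulate, else return acc
def linkLoopP (s : List Char) (i : Nat) (acc : List Char) : List Char :=
  if h : i < s.length then
    if PySem.Chars.isIn [s[i]] "0123456789".toList then
      linkLoopP s (i + 1) (acc ++ [s[i]])
    else acc
  else acc
termination_by s.length - i

-- the other loop: for index in range(i, len(s)): sentinel → return acc, else accumulate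
def linkLoopO (s : List Char) (i : Nat) (acc : List Char) : List Char :=
  if h : i < s.length then
    if PySem.Chars.isIn [s[i]] "/?&".toList then acc
    else linkLoopO s (i + 1) (acc ++ [s[i]])
  else acc
termination_by s.length - i

def link_editor (link : String) : String :=
  let s := PySem.Chars.strip link.toList
  if PySem.Chars.isIn "profile.php".toList s then
    -- id_index = link.find("id=") + 3 is ≥ 2 ≥ 0 always, so .toNat is exact
    String.ofList (linkLoopP s ((PySem.Chars.find s "id=".toList) + 3).toNat [])
  else
    String.ofList (linkLoopO s ((PySem.Chars.find s "facebook.com/".toList) + 13).toNat [])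

-- ===== PORT B =====
def link_editor_alt (link : String) : String :=
  let s := PySem.Chars.strip link.toList
  if PySem.Chars.isIn "profile.php".toList s then
    let tail := PySem.List.slice s (some ((PySem.Chars.find s "id=".toList) + 3)) none
    -- tail.lstrip("0123456789") ported by hand: drop the leading chars that are in the set (exact)
    let stripped := tail.dropWhile (fun c => PySem.Chars.isIn [c] "0123456789".toList)
    String.ofList (PySem.List.slice tail none (some ((tail.length : Int) - (stripped.length : Int))))
  else
    let tail := PySem.List.slice s (some ((PySem.Chars.find s "facebook.com/".toList) + 13)) none
    let cut := PySem.List.minD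
      (("/?&".toList.map (fun c => PySem.Chars.find tail [c])).filter (fun i => i ≠ -1))
      (fun i => i) (tail.length : Int)
    String.ofList (PySem.List.slice tail none (some cut))

-- ===== PRECONDITION & SPEC =====
def Spec_link_editor (link : String) (out : String) : Prop := out = link_editor_alt link
instance (link : String) (out : String) : Decidable (Spec_link_editor link out) := by unfold Spec_link_editor; infer_instance

-- ===== CLAIM (what is proved, stated in full; the proofs are below) =====
def Claim_equal_link_editor : Prop := ∀ (link : String), Dom_link_editor link → Spec_link_editor link (link_editor link)

-- ===== LEMMAS AND PROOFS =====

-- `c in chars` on a one-character needle is list membership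
theorem isIn_singleton (c : Char) (l : List Char) :
    PySem.Chars.isIn [c] l = true ↔ c ∈ l := by
  rw [PySem.Chars.isIn_iff_infix]; exact List.singleton_infix_iff c l

theorem singleton_prefix_drop (t : List Char) (c : Char) (k : Nat) :
    [c] <+: t.drop k ↔ t[k]? = some c := by
  rw [← List.head?_drop]
  constructor
  · rintro ⟨v, hv⟩; rw [← hv]; rfl
  · intro h
    cases hd : t.drop k with
    | nil => simp [hd] at h
    | cons a v => rw [hd] at h; simp at h; exact ⟨v, by simp [h]⟩

-- tail.find(c) for a single char: position of the first occurrence of c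
theorem find_singleton_spec (t : List Char) (c : Char) (h : PySem.Chars.find t [c] ≠ -1) :
    ∃ k : Nat, PySem.Chars.find t [c] = (k : Int) ∧ k < t.length ∧ t[k]? = some c ∧
      ∀ j < k, t[j]? ≠ some c := by
  have h0 : 0 ≤ PySem.Chars.find t [c] := by
    have := PySem.Chars.neg_one_le_find t [c]; omega
  obtain ⟨hpre, hmin⟩ := PySem.Chars.find_spec h0
  refine ⟨(PySem.Chars.find t [c]).toNat, (Int.toNat_of_nonneg h0).symm, ?_, ?_, ?_⟩
  · obtain ⟨hh, -⟩ := List.getElem?_eq_some_iff.1 ((singleton_prefix_drop t c _).1 hpre)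
    exact hh
  · exact (singleton_prefix_drop t c _).1 hpre
  · intro j hj hc
    exact hmin j hj ((singleton_prefix_drop t c j).2 hc)

theorem find_singleton_ne_neg_one (t : List Char) (c : Char) (h : c ∈ t) :
    PySem.Chars.find t [c] ≠ -1 := by
  rw [Ne, PySem.Chars.find_eq_neg_one_iff, not_not]
  exact (List.singleton_infix_iff c t).2 h

-- A's profile loop accumulates the maximal digit prefix of s.drop i
theorem linkLoopP_eq (s : List Char) (i : Nat) (acc : List Char) :
    linkLoopP s i acc =
      acc ++ (s.drop i).takeWhile (fun c => PySem.Chars.isIn [c] "0123456789".toList) := by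
  fun_induction linkLoopP s i acc with
  | case1 i acc h hd ih =>
      rw [ih, List.drop_eq_getElem_cons h, List.takeWhile_cons, hd]
      simp
  | case2 i acc h hd =>
      have hd' : PySem.Chars.isIn [s[i]] "0123456789".toList = false := by simpa using hd
      rw [List.drop_eq_getElem_cons h, List.takeWhile_cons, hd']
      simp
  | case3 i acc h =>
      rw [List.drop_eq_nil_iff.2 (by omega)]
      simp

-- A's other loop accumulates the maximal sentinel-free prefix of s.drop i
theorem linkLoopO_eq (s : List Char) (i : Nat) (acc : List Char) :
    linkLoopO s i acc =
      acc ++ (s.drop i).takeWhile (fun c => !PySem.Chars.isIn [c] "/?&".toList) := by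
  fun_induction linkLoopO s i acc with
  | case1 i acc h hd =>
      rw [List.drop_eq_getElem_cons h, List.takeWhile_cons, hd]
      simp
  | case2 i acc h hd ih =>
      have hd' : PySem.Chars.isIn [s[i]] "/?&".toList = false := by simpa using hd
      rw [ih, List.drop_eq_getElem_cons h, List.takeWhile_cons, hd']
      simp
  | case3 i acc h =>
      rw [List.drop_eq_nil_iff.2 (by omega)]
      simp

-- take of (len − len of the lstrip result) is takeWhile
theorem take_sub_dropWhile (t : List Char) (p : Char → Bool) :
    t.take ((t.length : Int) - ((t.dropWhile p).length : Int)).toNat = t.takeWhile p := by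
  have hlen : (t.takeWhile p).length + (t.dropWhile p).length = t.length := by
    rw [← List.length_append, List.takeWhile_append_dropWhile]
  have h1 : ((t.length : Int) - ((t.dropWhile p).length : Int)).toNat = (t.takeWhile p).length := by
    omega
  rw [h1]
  exact ((List.prefix_iff_eq_take).1 (List.takeWhile_prefix p)).symm

-- min of the finds of the sentinels (default len) is the length of the sentinel-free prefix
theorem minD_finds_eq (t : List Char) :
    PySem.List.minD
      (("/?&".toList.map (fun c => PySem.Chars.find t [c])).filter (fun i => i ≠ -1))
      (fun i => i) (t.length : Int)
    = ((t.takeWhile (fun c => !PySem.Chars.isIn [c] "/?&".toList)).length : Int) := by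
  set q : Char → Bool := fun c => PySem.Chars.isIn [c] "/?&".toList with hq
  set n := List.findIdx q t with hn
  have hnle : n ≤ t.length := List.findIdx_le_length
  have heta : List.findIdx (fun a => q a) t = n := rfl
  have hlen : (t.takeWhile (fun c => !q c)).length = n := by
    rw [List.takeWhile_eq_take_findIdx_not]
    simp only [Bool.not_not, List.length_take, heta]
    omega
  rw [hlen]
  set F := (("/?&".toList.map (fun c => PySem.Chars.find t [c])).filter (fun i => i ≠ -1)) with hF
  have hmemF : ∀ c ∈ "/?&".toList, PySem.Chars.find t [c] ≠ -1 → PySem.Chars.find t [c] ∈ F := by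
    intro c hc hne
    rw [hF, List.mem_filter, List.mem_map]
    exact ⟨⟨c, hc, rfl⟩, by simpa using hne⟩
  have claimA : ∀ x ∈ F, (n : Int) ≤ x := by
    intro x hx
    rw [hF, List.mem_filter, List.mem_map] at hx
    obtain ⟨⟨c, hc, rfl⟩, hne⟩ := hx
    have hne' : PySem.Chars.find t [c] ≠ -1 := by simpa using hne
    obtain ⟨k, hk, hklt, hget, -⟩ := find_singleton_spec t c hne'
    obtain ⟨hh, hgv⟩ := List.getElem?_eq_some_iff.1 hget
    rw [hk]
    have hnk : n ≤ k := by
      by_contra hlt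
      have hfalse := List.not_of_lt_findIdx (p := q) (xs := t) (i := k) (by omega)
      have htrue : q t[k] = true := by
        simp only [hq]; rw [hgv]; exact (isIn_singleton c _).2 hc
      cases htrue.symm.trans hfalse
    exact_mod_cast hnk
  by_cases hcase : n < t.length
  · -- a sentinel occurs: the first one sits at position n and its find is exactly n
    have hqn : q t[n] = true := List.findIdx_getElem (w := hcase)
    have hcm : t[n] ∈ "/?&".toList := (isIn_singleton _ _).1 hqn
    have hmem : t[n] ∈ t := List.getElem_mem hcase
    have hne := find_singleton_ne_neg_one t t[n] hmem
    have hinF := hmemF t[n] hcm hne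
    obtain ⟨k, hk, hklt, hget, hminimal⟩ := find_singleton_spec t t[n] hne
    have hkn : (PySem.Chars.find t [t[n]]) = (n : Int) := by
      have h1 : ¬ n < k := fun hlt =>
        hminimal n hlt (List.getElem?_eq_some_iff.2 ⟨hcase, rfl⟩)
      have h2 : (n : Int) ≤ k := by rw [← hk]; exact claimA _ hinF
      rw [hk]
      have : k = n := by omega
      rw [this]
    obtain ⟨m, hm⟩ : ∃ m, PySem.List.min? F (fun i => i) = some m := by
      cases hmm : PySem.List.min? F (fun i => i) with
      | none =>
          rw [PySem.List.min?_eq_none_iff] at hmm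
          rw [hmm] at hinF
          exact absurd hinF (List.not_mem_nil)
      | some m => exact ⟨m, rfl⟩
    have h1 : (n : Int) ≤ m := claimA m (PySem.List.min?_mem hm)
    have h2 : m ≤ PySem.Chars.find t [t[n]] := PySem.List.min?_isMin hm _ hinF
    rw [hkn] at h2
    have hmn : m = (n : Int) := le_antisymm h2 h1
    simp [PySem.List.minD, hm, hmn]
  · -- no sentinel occurs in t: every find is -1, F = [], the min is the default len(tail)
    have hneq : t.length = n := by omega
    have hall : ∀ x ∈ t, q x = false := List.findIdx_eq_length.1 hneq.symm
    have hFnil : F = [] := by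
      rw [hF, List.filter_eq_nil_iff]
      intro x hx
      rw [List.mem_map] at hx
      obtain ⟨c, hc, rfl⟩ := hx
      simp only [ne_eq, decide_not, Bool.not_eq_eq_eq_not, Bool.not_true,
        decide_eq_false_iff_not, not_not]
      by_contra hne
      obtain ⟨k, hk, hklt, hget, -⟩ := find_singleton_spec t c hne
      obtain ⟨hh, hgv⟩ := List.getElem?_eq_some_iff.1 hget
      have hfalse := hall t[k] (List.getElem_mem hklt)
      have htrue : q t[k] = true := by
        simp only [hq]; rw [hgv]; exact (isIn_singleton c _).2 hc
      cases htrue.symm.trans hfalse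
    rw [hFnil, hneq]
    simp [PySem.List.minD, PySem.List.min?]

-- ===== VERDICT (by name: the statement is the Claim_ definition above) =====
theorem link_editor_spec : Claim_equal_link_editor := by
  intro link _
  unfold Spec_link_editor link_editor link_editor_alt
  set s := PySem.Chars.strip link.toList with hs
  by_cases hp : PySem.Chars.isIn "profile.php".toList s = true
  · simp only [hp, if_true]
    have h0 : (0:Int) ≤ PySem.Chars.find s "id=".toList + 3 := by
      have := PySem.Chars.neg_one_le_find s "id=".toList; omega
    rw [PySem.List.slice_from _ h0, linkLoopP_eq]
    set t := s.drop ((PySem.Chars.find s "id=".toList) + 3).toNat with ht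
    set p : Char → Bool := fun c => PySem.Chars.isIn [c] "0123456789".toList with hpd
    have hb : (0:Int) ≤ (t.length : Int) - ((t.dropWhile p).length : Int) := by
      have := List.length_dropWhile_le (p := p) (l := t); omega
    rw [PySem.List.slice_to _ hb, take_sub_dropWhile]
    simp
  · have hp' : PySem.Chars.isIn "profile.php".toList s = false := by simpa using hp
    simp only [hp', Bool.false_eq_true, if_false]
    have h0 : (0:Int) ≤ PySem.Chars.find s "facebook.com/".toList + 13 := by
      have := PySem.Chars.neg_one_le_find s "facebook.com/".toList; omega
    rw [PySem.List.slice_from _ h0, linkLoopO_eq]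
    set t := s.drop ((PySem.Chars.find s "facebook.com/".toList) + 13).toNat with ht
    rw [minD_finds_eq t, PySem.List.slice_to _ (by positivity)]
    rw [Int.toNat_natCast]
    rw [← (List.prefix_iff_eq_take).1 (List.takeWhile_prefix _)]
    simp
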